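-- pv_equiv track=rewrite | github.com/NeLy-EPFL/Long-Term-Imaging-VNC-Drosophila | Optogenetic_behavior_experiments/postprocessing_analysis.py | compute_av_stim_frame
-- ===== SOURCE A (Python) =====
-- def compute_av_stim_frame(experiments_stim_frames):
--
--     """
--     Compute the average frame accross the flies were te stimulation starts
--     and end
--     """
--
--     av_stim_frame = {}
--
--     for i, expe_stim_frame in enumerate(experiments_stim_frames):
--         for stim in expe_stim_frame:
--             if "on" in stim:
--                 if i == 0:
--                     av_stim_frame[stim] = [expe_stim_frame[stim]]
--                 else:
--                     av_stim_frame[stim].append(expe_stim_frame[stim])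
--
--     return av_stim_frame
-- ===== SOURCE B (Python) =====
-- def compute_av_stim_frame(experiments_stim_frames):
--     """
--     Compute the average frame accross the flies were te stimulation starts
--     and end
--     """
--     experiments_stim_frames = list(experiments_stim_frames)
--     if not experiments_stim_frames:
--         return {}
--     first = experiments_stim_frames[0]
--     return {stim: [expe[stim] for expe in experiments_stim_frames if stim in expe]
--             for stim in first if "on" in stim}
-- ===== Notes on version B (the rewrite author's own statement) =====
-- stated objective: alternative
-- what changed: B is key-major: it takes the 'on' keys of the first experiment and builds each result list in one dict comprehension by collecting that key's value from every experiment that has it, instead of A's experiment-major indexed loop that mutates a dict with an i==0 branch.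
import Mathlib
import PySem

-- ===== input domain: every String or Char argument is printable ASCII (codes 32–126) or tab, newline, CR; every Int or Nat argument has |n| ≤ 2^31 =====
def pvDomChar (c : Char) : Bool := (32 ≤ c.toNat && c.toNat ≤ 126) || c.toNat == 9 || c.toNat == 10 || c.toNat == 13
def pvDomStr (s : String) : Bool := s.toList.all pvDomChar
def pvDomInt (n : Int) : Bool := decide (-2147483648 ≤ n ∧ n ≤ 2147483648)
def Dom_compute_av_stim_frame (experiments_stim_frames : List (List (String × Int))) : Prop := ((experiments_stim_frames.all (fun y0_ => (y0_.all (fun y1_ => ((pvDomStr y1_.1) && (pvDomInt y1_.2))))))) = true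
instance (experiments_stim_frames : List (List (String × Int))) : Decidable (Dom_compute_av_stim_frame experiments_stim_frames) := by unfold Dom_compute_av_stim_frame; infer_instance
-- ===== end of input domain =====

-- B rebuilds the grouping key-major (one dict comprehension over the first experiment's "on" keys,
-- collecting each key's value from every experiment that has it) instead of A's experiment-major
-- indexed loop with an i==0 branch; same values wherever A returns (Pre_ excludes A's KeyError inputs).


-- ===== PORT A =====
-- inner loop body: 'for stim in expe_stim_frame: if "on" in stim: ...' at enumerate index i.
-- Each experiment dict is the assoc list read with Python dict semantics (PySem.Dict.ofList).
-- In the i ≠ 0 branch Python does av_stim_frame[stim].append(v): a missing key is a KeyError,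
-- excluded by Pre_ below; there the port leaves av unchanged (no claim is made on such inputs).
-- expe_stim_frame[stim] with stim drawn from the dict's own keys is exact as getD _ 0.
def pvInner (i : Int) (e : List (String × Int)) (av : PySem.Dict String (List Int)) :
    PySem.Dict String (List Int) :=
  (PySem.Dict.ofList e).keys.foldl
    (fun av stim =>
      if PySem.Str.isIn "on" stim then
        if i == 0 then
          av.insert stim [(PySem.Dict.ofList e).getD stim 0]
        else
          match av.get? stim with
          | some l => av.insert stim (l ++ [(PySem.Dict.ofList e).getD stim 0])
          | none => av
      else av)
    av

def compute_av_stim_frame (experiments_stim_frames : List (List (String × Int))) : List (String × List Int) :=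
  ((PySem.List.enumerate experiments_stim_frames).foldl
    (fun av ie => pvInner ie.1 ie.2 av)
    PySem.Dict.empty).items

-- ===== PORT B =====
-- dict comprehension over the distinct "on" keys of the first experiment (nodup by
-- PySem.Dict.nodup_keys_ofList, so its items list is exactly this map); for each key,
-- '[expe[stim] for expe in experiments_stim_frames if stim in expe]' is the filterMap of get?.
def compute_av_stim_frame_alt (experiments_stim_frames : List (List (String × Int))) : List (String × List Int) :=
  match experiments_stim_frames with
  | [] => []
  | first :: _ =>
    ((PySem.Dict.ofList first).keys.filter (fun stim => PySem.Str.isIn "on" stim)).map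
      (fun stim =>
        (stim, experiments_stim_frames.filterMap (fun e => (PySem.Dict.ofList e).get? stim)))

-- ===== PRECONDITION & SPEC =====
-- Pre_ excludes exactly the inputs where A raises KeyError: an experiment after the first
-- containing a key with "on" in it that the first experiment does not contain.
def Pre_compute_av_stim_frame (experiments_stim_frames : List (List (String × Int))) : Prop :=
  ∀ e ∈ experiments_stim_frames.drop 1, ∀ stim ∈ (PySem.Dict.ofList e).keys,
    PySem.Str.isIn "on" stim = true →
      stim ∈ (PySem.Dict.ofList (experiments_stim_frames.headD [])).keys
instance (experiments_stim_frames : List (List (String × Int))) : Decidable (Pre_compute_av_stim_frame experiments_stim_frames) := by unfold Pre_compute_av_stim_frame; infer_instance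

def pvWitness_compute_av_stim_frame : (List (List (String × Int))) :=
  [[("laser_on", 3), ("off", 0)], [("laser_on", 7)]]

def Spec_compute_av_stim_frame (experiments_stim_frames : List (List (String × Int))) (out : List (String × List Int)) : Prop := out = compute_av_stim_frame_alt experiments_stim_frames
instance (experiments_stim_frames : List (List (String × Int))) (out : List (String × List Int)) : Decidable (Spec_compute_av_stim_frame experiments_stim_frames out) := by unfold Spec_compute_av_stim_frame; infer_instance

-- ===== CLAIM (what is proved, stated in full; the proofs are below) =====
def Claim_equal_compute_av_stim_frame : Prop := ∀ (experiments_stim_frames : List (List (String × Int))), Dom_compute_av_stim_frame experiments_stim_frames → Pre_compute_av_stim_frame experiments_stim_frames → Spec_compute_av_stim_frame experiments_stim_frames (compute_av_stim_frame experiments_stim_frames)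

-- ===== LEMMAS AND PROOFS =====

-- keys / insert / lookup on an accumulator of shape mk (S.map (k, g k))

theorem pvMk_keys (S : List String) (g : String → List Int) :
    (PySem.Dict.mk (S.map (fun k => (k, g k)))).keys = S := by
  simp [PySem.Dict.keys, Function.comp_def]

theorem pvMk_insert (S : List String) (g : String → List Int)
    (stim : String) (hs : stim ∈ S) (w : List Int) :
    (PySem.Dict.mk (S.map (fun k => (k, g k)))).insert stim w
      = PySem.Dict.mk (S.map (fun k => (k, if k = stim then w else g k))) := by
  apply PySem.Dict.ext
  rw [PySem.Dict.items_insert_of_contains _ _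
      ((PySem.Dict.contains_iff_mem_keys _ _).mpr (by rw [pvMk_keys]; exact hs))]
  simp only [List.map_map]
  apply List.map_congr_left
  intro k hk
  by_cases h : k = stim <;> simp [h]

theorem pvMk_get? (S : List String) (hS : S.Nodup) (g : String → List Int)
    (stim : String) (hs : stim ∈ S) :
    (PySem.Dict.mk (S.map (fun k => (k, g k)))).get? stim = some (g stim) := by
  apply PySem.Dict.get?_of_mem_items
  · exact List.mem_map_of_mem hs
  · rw [pvMk_keys]; exact hS

theorem pvMk_get?_none (S : List String) (g : String → List Int)
    (stim : String) (hs : stim ∉ S) :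
    (PySem.Dict.mk (S.map (fun k => (k, g k)))).get? stim = none := by
  rw [PySem.Dict.get?_eq_none_iff_not_mem_keys, pvMk_keys]
  exact hs

theorem pvFold_keys (e : List (String × Int)) (L : List String) (hL : L.Nodup)
    (S : List String) (hS : S.Nodup) (hOn : ∀ k ∈ S, PySem.Str.isIn "on" k = true)
    (g : String → List Int) :
    L.foldl
      (fun av stim =>
        if PySem.Str.isIn "on" stim then
          match av.get? stim with
          | some l => av.insert stim (l ++ [(PySem.Dict.ofList e).getD stim 0])
          | none => av
        else av)
      (PySem.Dict.mk (S.map (fun k => (k, g k))))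
    = PySem.Dict.mk (S.map (fun k =>
        (k, if k ∈ L then g k ++ [(PySem.Dict.ofList e).getD k 0] else g k))) := by
  induction L generalizing g with
  | nil => simp
  | cons stim L' ih =>
    have hstim : stim ∉ L' := (List.nodup_cons.mp hL).1
    have hL' : L'.Nodup := (List.nodup_cons.mp hL).2
    rw [List.foldl_cons]
    by_cases hon : PySem.Str.isIn "on" stim = true
    · by_cases hs : stim ∈ S
      · rw [if_pos hon]
        rw [pvMk_get? S hS g stim hs]
        simp only []
        rw [pvMk_insert S g stim hs]
        rw [ih hL' (fun k => if k = stim then g stim ++ [(PySem.Dict.ofList e).getD stim 0] else g k)]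
        congr 1
        apply List.map_congr_left
        intro k hk
        by_cases h : k = stim
        · subst h
          simp [hstim]
        · simp [h, List.mem_cons]
      · rw [if_pos hon]
        rw [pvMk_get?_none S g stim hs]
        simp only []
        rw [ih hL' g]
        congr 1
        apply List.map_congr_left
        intro k hk
        have h : k ≠ stim := fun hkk => hs (hkk ▸ hk)
        simp [h, List.mem_cons]
    · rw [if_neg hon]
      rw [ih hL' g]
      congr 1
      apply List.map_congr_left
      intro k hk
      have h : k ≠ stim := fun hkk => hon (hkk ▸ hOn k hk)
      simp [h, List.mem_cons]

-- After the first experiment (i = 0, empty accumulator): one entry per distinct "on" key.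
theorem pvInner_first (e : List (String × Int)) :
    pvInner 0 e PySem.Dict.empty
      = PySem.Dict.mk
          (((PySem.Dict.ofList e).keys.filter (fun stim => PySem.Str.isIn "on" stim)).map
            (fun stim => (stim, [(PySem.Dict.ofList e).getD stim 0]))) := by
  unfold pvInner
  simp only [beq_self_eq_true, if_true]
  rw [PySem.List.foldl_if_eq_foldl_filter (fun stim => PySem.Str.isIn "on" stim)
      (fun av stim => av.insert stim [(PySem.Dict.ofList e).getD stim 0])
      (PySem.Dict.ofList e).keys PySem.Dict.empty]
  apply PySem.Dict.ext
  rw [PySem.Dict.items_foldl_insert_fresh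
        (k := fun s => s) (v := fun s => [(PySem.Dict.ofList e).getD s 0])
        _ _ (fun a _ => PySem.Dict.contains_empty a)
        (by simpa using ((PySem.Dict.nodup_keys_ofList e).filter _))]
  simp [PySem.Dict.empty]

-- A later experiment appends its value (when present) to every entry.
theorem pvInner_tail (i : Int) (hi : i ≠ 0) (e : List (String × Int))
    (S : List String) (hS : S.Nodup) (hOn : ∀ k ∈ S, PySem.Str.isIn "on" k = true)
    (g : String → List Int) :
    pvInner i e (PySem.Dict.mk (S.map (fun k => (k, g k))))
    = PySem.Dict.mk (S.map (fun k =>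
        (k, g k ++ ((PySem.Dict.ofList e).get? k).toList))) := by
  have hib : (i == 0) = false := by simpa using hi
  unfold pvInner
  simp only [hib, Bool.false_eq_true, if_false]
  rw [pvFold_keys e (PySem.Dict.ofList e).keys (PySem.Dict.nodup_keys_ofList e) S hS hOn g]
  congr 1
  apply List.map_congr_left
  intro k _
  cases hgk : (PySem.Dict.ofList e).get? k with
  | none =>
    have : k ∉ (PySem.Dict.ofList e).keys :=
      (PySem.Dict.get?_eq_none_iff_not_mem_keys _ _).mp hgk
    simp [this]
  | some v =>
    have hmem : k ∈ (PySem.Dict.ofList e).keys := by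
      by_contra hn
      rw [(PySem.Dict.get?_eq_none_iff_not_mem_keys _ _).mpr hn] at hgk
      simp at hgk
    have hgd : (PySem.Dict.ofList e).getD k 0 = v := by
      rw [PySem.Dict.getD_eq_get?_getD, hgk]; rfl
    simp [hmem, hgd]

-- Folding the remaining experiments appends each key's filterMap of values.
theorem pvFold_tail (P : List (Int × List (String × Int))) (hP : ∀ p ∈ P, p.1 ≠ 0)
    (S : List String) (hS : S.Nodup) (hOn : ∀ k ∈ S, PySem.Str.isIn "on" k = true)
    (g : String → List Int) :
    P.foldl (fun av ie => pvInner ie.1 ie.2 av) (PySem.Dict.mk (S.map (fun k => (k, g k))))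
    = PySem.Dict.mk (S.map (fun k =>
        (k, g k ++ (P.map (·.2)).filterMap (fun e => (PySem.Dict.ofList e).get? k)))) := by
  induction P generalizing g with
  | nil => simp
  | cons p P' ih =>
    rw [List.foldl_cons]
    rw [pvInner_tail p.1 (hP p List.mem_cons_self) p.2 S hS hOn g]
    rw [ih (fun q hq => hP q (List.mem_cons_of_mem p hq))
        (fun k => g k ++ ((PySem.Dict.ofList p.2).get? k).toList)]
    congr 1
    apply List.map_congr_left
    intro k _
    cases hgk : (PySem.Dict.ofList p.2).get? k <;>
      simp [hgk]

-- ===== VERDICT (by name: the statement is the Claim_ definition above) =====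
theorem compute_av_stim_frame_spec : Claim_equal_compute_av_stim_frame := by
  intro xs _dom _pre
  unfold Spec_compute_av_stim_frame
  cases xs with
  | nil => rfl
  | cons first rest =>
    unfold compute_av_stim_frame compute_av_stim_frame_alt
    rw [PySem.List.enumerate_cons, List.foldl_cons]
    show ((PySem.List.enumerate rest (0 + 1)).foldl (fun av ie => pvInner ie.1 ie.2 av)
        (pvInner 0 first PySem.Dict.empty)).items = _
    rw [pvInner_first first]
    have hS : ((PySem.Dict.ofList first).keys.filter
        (fun stim => PySem.Str.isIn "on" stim)).Nodup :=
      (PySem.Dict.nodup_keys_ofList first).filter _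
    have hOn : ∀ k ∈ (PySem.Dict.ofList first).keys.filter
        (fun stim => PySem.Str.isIn "on" stim), PySem.Str.isIn "on" k = true :=
      fun k hk => (List.mem_filter.mp hk).2
    have hP : ∀ p ∈ PySem.List.enumerate rest (0 + 1), p.1 ≠ 0 := by
      intro p hp
      obtain ⟨j, hj, rfl⟩ := (PySem.List.mem_enumerate_iff _ _ _).mp hp
      simp only []
      omega
    rw [pvFold_tail (PySem.List.enumerate rest (0 + 1)) hP _ hS hOn _]
    rw [PySem.List.map_snd_enumerate]
    apply List.map_congr_left
    intro k hk
    have hmem : k ∈ (PySem.Dict.ofList first).keys := (List.mem_filter.mp hk).1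
    cases hgk : (PySem.Dict.ofList first).get? k with
    | none =>
      exact absurd ((PySem.Dict.get?_eq_none_iff_not_mem_keys _ _).mp hgk) (by simpa using hmem)
    | some v =>
      have hgd : (PySem.Dict.ofList first).getD k 0 = v := by
        rw [PySem.Dict.getD_eq_get?_getD, hgk]; rfl
      simp [hgk, hgd]
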